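-- pv_equiv track=rewrite | github.com/euccas/pymorsels | pm11-lstrip/lstrip.py | lstrip0
-- ===== SOURCE A (Python) =====
-- def lstrip0(iterable, obj):
--     i = 0
--     iterable_list = list(iterable)
--     while i < len(iterable_list):
--         if iterable_list[i] != obj:
--             break
--         i += 1
--
--     for k in range(i, len(iterable_list)):
--         yield iterable_list[k]
-- ===== SOURCE B (Python) =====
-- def lstrip0(iterable, obj):
--     stripping = True
--     for item in iterable:
--         if stripping and not (item != obj):
--             continue
--         stripping = False
--         yield item
-- ===== Notes on version B (the rewrite author's own statement) =====
-- stated objective: idiomatic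
-- what changed: Single lazy streaming pass over the iterable with a boolean stripping flag, instead of materializing the whole iterable into a list and scanning it twice (index-finding while loop, then a range loop of yields).
import Mathlib
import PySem

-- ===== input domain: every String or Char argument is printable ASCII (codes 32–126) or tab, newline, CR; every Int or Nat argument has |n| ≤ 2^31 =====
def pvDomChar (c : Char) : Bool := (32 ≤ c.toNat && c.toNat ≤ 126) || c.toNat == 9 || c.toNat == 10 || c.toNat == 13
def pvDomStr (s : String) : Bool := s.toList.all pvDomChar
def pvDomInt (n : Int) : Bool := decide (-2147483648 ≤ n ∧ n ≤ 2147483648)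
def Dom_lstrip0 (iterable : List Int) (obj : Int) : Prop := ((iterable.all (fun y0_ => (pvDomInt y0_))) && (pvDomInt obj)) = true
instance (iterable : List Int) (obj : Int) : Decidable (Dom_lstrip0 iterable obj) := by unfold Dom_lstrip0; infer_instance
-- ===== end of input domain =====

-- B replaces A's list-materializing two-loop generator by a single streaming pass with a boolean flag (idiomatic; equivalence is about the returned sequence of yielded values).


-- ===== PORT A =====
-- the while loop: advance index i while iterable_list[i] == obj
def lstrip0Idx (xs : List Int) (obj : Int) (i : Nat) : Nat :=
  if h : i < xs.length then
    (if xs[i] ≠ obj then i else lstrip0Idx xs obj (i + 1))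
  else i
termination_by xs.length - i

-- the for loop: for k in range(i, len), yield iterable_list[k]
def lstrip0Emit (xs : List Int) (k : Nat) : List Int :=
  if h : k < xs.length then xs[k] :: lstrip0Emit xs (k + 1) else []
termination_by xs.length - k

def lstrip0 (iterable : List Int) (obj : Int) : List Int :=
  lstrip0Emit iterable (lstrip0Idx iterable obj 0)

-- ===== PORT B =====
-- one streaming pass with a boolean `stripping` flag
def lstrip0AltGo (obj : Int) : List Int → Bool → List Int
  | [], _ => []
  | x :: xs, stripping =>
      if stripping && !(x ≠ obj) then lstrip0AltGo obj xs stripping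
      else x :: lstrip0AltGo obj xs false

def lstrip0_alt (iterable : List Int) (obj : Int) : List Int :=
  lstrip0AltGo obj iterable true

-- ===== PRECONDITION & SPEC =====
def Spec_lstrip0 (iterable : List Int) (obj : Int) (out : List Int) : Prop := out = lstrip0_alt iterable obj
instance (iterable : List Int) (obj : Int) (out : List Int) : Decidable (Spec_lstrip0 iterable obj out) := by unfold Spec_lstrip0; infer_instance

-- ===== CLAIM (what is proved, stated in full; the proofs are below) =====
def Claim_equal_lstrip0 : Prop := ∀ (iterable : List Int) (obj : Int), Dom_lstrip0 iterable obj → Spec_lstrip0 iterable obj (lstrip0 iterable obj)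

-- ===== LEMMAS AND PROOFS =====

theorem lstrip0Emit_eq_drop (xs : List Int) (k : Nat) : lstrip0Emit xs k = xs.drop k := by
  induction k using lstrip0Emit.induct xs with
  | case1 k h ih =>
      rw [lstrip0Emit, dif_pos h, ih, List.drop_eq_getElem_cons h]
  | case2 k h =>
      rw [lstrip0Emit, dif_neg h, List.drop_eq_nil_of_le (by omega)]

theorem lstrip0AltGo_false (obj : Int) (xs : List Int) : lstrip0AltGo obj xs false = xs := by
  induction xs with
  | nil => rfl
  | cons x xs ih => simp [lstrip0AltGo, ih]

theorem lstrip0_main (xs : List Int) (obj : Int) (i : Nat) :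
    lstrip0Emit xs (lstrip0Idx xs obj i) = lstrip0AltGo obj (xs.drop i) true := by
  induction i using lstrip0Idx.induct xs obj with
  | case1 i h hne =>
      rw [lstrip0Idx, dif_pos h, if_pos hne, lstrip0Emit_eq_drop,
        List.drop_eq_getElem_cons h, lstrip0AltGo]
      simp [hne, lstrip0AltGo_false]
  | case2 i h heq ih =>
      rw [lstrip0Idx, dif_pos h, if_neg heq, ih, List.drop_eq_getElem_cons h, lstrip0AltGo]
      simp at heq
      simp [heq]
  | case3 i h =>
      rw [lstrip0Idx, dif_neg h, lstrip0Emit_eq_drop,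
        List.drop_eq_nil_of_le (le_of_not_gt h)]
      rfl

-- ===== VERDICT (by name: the statement is the Claim_ definition above) =====
theorem lstrip0_spec : Claim_equal_lstrip0 := by
  intro iterable obj _
  unfold Spec_lstrip0 lstrip0 lstrip0_alt
  simpa using lstrip0_main iterable obj 0
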